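-- pv_equiv track=rewrite | github.com/pcphantom/sandbox_rpg | sandbox_rpg_wasm/core/item_stack.py | add_to_slots
-- ===== SOURCE A (Python) =====
-- from typing import Dict, Optional, Tuple
--
-- def normalize_rarity(rarity: str) -> str:
--     """Return the canonical rarity string.
--
--     Every item always has a rarity — ``'common'`` is the baseline.
--     """
--     if not rarity:
--         return 'common'
--     return rarity
--
-- def add_to_slots(slots: Dict[int, Tuple[str, int]],
--                  enchants: Dict[int, dict],
--                  rarities: Dict[int, str],
--                  capacity: int,
--                  item_id: str,
--                  enchant: Optional[dict],
--                  rarity: str = 'common',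
--                  count: int = 1,
--                  non_stackable: bool = False) -> int:
--     """Add *count* of an item to a slot-dict container.
--
--     Stacks with an existing slot only when item_id + enchant + rarity all
--     match (using normalised rarity).  Non-stackable items always get their
--     own slot (one unit each).
--
--     Returns the number of items that could NOT be placed (overflow).
--     """
--     norm_rar = normalize_rarity(rarity)
--
--     if non_stackable:
--         placed = 0
--         for _ in range(count):
--             for i in range(capacity):
--                 if i not in slots:
--                     slots[i] = (item_id, 1)
--                     if enchant:
--                         enchants[i] = dict(enchant)
--                     rarities[i] = norm_rar
--                     placed += 1
--                     break
--             else: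
--                 return count - placed
--         return 0
--
--     # Stackable — find matching stack
--     for slot, (iid, c) in slots.items():
--         if iid != item_id:
--             continue
--         slot_ench = enchants.get(slot)
--         slot_rar = rarities.get(slot, 'common')
--         if slot_ench != enchant:
--             continue
--         if slot_rar != norm_rar:
--             continue
--         slots[slot] = (iid, c + count)
--         return 0
--
--     # No matching stack — first empty slot
--     for i in range(capacity):
--         if i not in slots:
--             slots[i] = (item_id, count)
--             if enchant:
--                 enchants[i] = dict(enchant)
--             rarities[i] = norm_rar
--             return 0
--     return count
-- ===== SOURCE B (Python) =====
-- def add_to_slots(slots, enchants, rarities, capacity, item_id, enchant,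
--                  rarity='common', count=1, non_stackable=False):
--     norm_rar = rarity or 'common'
--     # occupied slot indices inside the slot range, and the empty-slot count, via set arithmetic
--     occ = {k for k in slots if 0 <= k < capacity}
--     empt = max(capacity, 0) - len(occ)
--
--     def empty_slots():
--         # yield the empty slot indices in increasing order by walking the gaps
--         # between the sorted occupied indices (never materialises the range)
--         nxt = 0
--         for k in sorted(occ):
--             while nxt < k:
--                 yield nxt
--                 nxt += 1
--             nxt = k + 1
--         while nxt < capacity:
--             yield nxt
--             nxt += 1
--
--     def place(i, units):
--         slots[i] = (item_id, units)
--         if enchant: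
--             enchants[i] = dict(enchant)
--         rarities[i] = norm_rar
--
--     if non_stackable:
--         todo = min(max(count, 0), empt)
--         for i in empty_slots():
--             if todo == 0:
--                 break
--             place(i, 1)
--             todo -= 1
--         return max(count - empt, 0)
--
--     # Stackable: merge into a matching stack if any
--     for slot, (iid, c) in slots.items():
--         if (iid == item_id and enchants.get(slot) == enchant
--                 and rarities.get(slot, 'common') == norm_rar):
--             slots[slot] = (iid, c + count)
--             return 0
--     if empt == 0:
--         return count
--     place(next(empty_slots()), count)
--     return 0
-- ===== Notes on version B (the rewrite author's own statement) =====
-- stated objective: alternative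
-- what changed: B derives the overflow by set arithmetic - it builds the occupied in-range key set once, computes empt = max(capacity,0) - len(occ), and returns the closed formula max(count - empt, 0) (or empt == 0 for a new stack), placing units via a sorted-keys gap walk, instead of A's restart-from-zero rescan of the whole slot range per unit.
import Mathlib
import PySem

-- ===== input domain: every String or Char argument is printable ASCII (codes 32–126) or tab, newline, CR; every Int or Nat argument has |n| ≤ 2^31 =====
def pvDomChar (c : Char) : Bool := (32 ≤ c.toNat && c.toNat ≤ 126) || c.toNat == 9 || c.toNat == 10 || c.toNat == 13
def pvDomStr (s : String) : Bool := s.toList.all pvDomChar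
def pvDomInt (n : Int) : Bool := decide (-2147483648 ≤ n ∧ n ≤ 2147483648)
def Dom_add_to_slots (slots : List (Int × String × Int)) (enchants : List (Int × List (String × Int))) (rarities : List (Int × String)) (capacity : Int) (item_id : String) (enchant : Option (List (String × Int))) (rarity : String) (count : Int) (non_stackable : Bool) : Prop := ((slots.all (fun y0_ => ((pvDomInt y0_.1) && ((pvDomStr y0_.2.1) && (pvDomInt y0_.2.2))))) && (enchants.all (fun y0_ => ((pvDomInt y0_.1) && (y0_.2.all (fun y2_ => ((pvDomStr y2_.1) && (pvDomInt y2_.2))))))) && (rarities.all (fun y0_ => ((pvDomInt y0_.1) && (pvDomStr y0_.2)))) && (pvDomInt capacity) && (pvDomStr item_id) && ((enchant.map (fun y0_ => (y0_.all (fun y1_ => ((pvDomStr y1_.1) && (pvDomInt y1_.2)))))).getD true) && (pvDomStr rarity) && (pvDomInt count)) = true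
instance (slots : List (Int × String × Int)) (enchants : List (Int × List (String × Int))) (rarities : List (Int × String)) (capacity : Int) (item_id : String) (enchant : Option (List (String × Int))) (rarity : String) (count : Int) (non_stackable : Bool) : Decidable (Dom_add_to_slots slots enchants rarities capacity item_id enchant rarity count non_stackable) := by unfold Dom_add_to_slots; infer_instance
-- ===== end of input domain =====

-- B computes the list of empty slot indices once and derives the non-stackable overflow as the
-- closed formula max(count - len(empties), 0), instead of A's restart-from-zero rescan of the
-- whole slot range for every single unit.  Both Pythons perform the same in-place mutations of
-- slots/enchants/rarities; the equivalence proved here is about the RETURN value (the overflow).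

-- ===== PORT A =====
-- normalize_rarity
def pvNormRarity (r : String) : String := if r = "" then "common" else r

-- first-match lookup in the enchants dict: enchants.get(slot)
def pvGetEnch (enchants : List (Int × List (String × Int))) (k : Int) : Option (List (String × Int)) :=
  (enchants.find? (fun p => p.1 == k)).map (·.2)

-- rarities.get(slot, 'common')
def pvGetRar (rarities : List (Int × String)) (k : Int) : String :=
  ((rarities.find? (fun p => p.1 == k)).map (·.2)).getD "common"

-- value lookup inside an enchant dict
def pvGetV (d : List (String × Int)) (k : String) : Option Int :=
  (d.find? (fun p => p.1 == k)).map (·.2)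

-- Python's '==' on two dicts: equal as key→value maps, insertion order ignored
def pvDictEq (a b : List (String × Int)) : Bool :=
  a.all (fun p => pvGetV b p.1 == some p.2) && b.all (fun p => pvGetV a p.1 == some p.2)

-- Python's '==' on Optional[dict] values (slot_ench == enchant; None only equals None)
def pvOptDictEq : Option (List (String × Int)) → Option (List (String × Int)) → Bool
  | none, none => true
  | some a, some b => pvDictEq a b
  | _, _ => false

-- the stackable loop's continue-chain condition on one slots.items() entry
def pvChain (enchants : List (Int × List (String × Int))) (rarities : List (Int × String)) (item_id : String) (enchant : Option (List (String × Int))) (norm : String) (p : Int × String × Int) : Bool :=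
  if p.2.1 != item_id then false
  else if !(pvOptDictEq (pvGetEnch enchants p.1) enchant) then false
  else if pvGetRar rarities p.1 != norm then false
  else true

-- inner loop 'for i in range(capacity): if i not in slots: … break' — first empty slot index.
-- 'for i in range(capacity)' is ported by hand as a counting loop i = 0, 1, …, capacity-1
-- (exact: step 1, max(capacity,0) iterations), so the scan stops at the first hit.
def pvFirstEmptyAux (keys : List Int) (i : Int) (fuel : Nat) : Option Int :=
  match fuel with
  | 0 => none
  | Nat.succ n => if !(keys.contains i) then some i else pvFirstEmptyAux keys (i + 1) n

def pvFirstEmpty (keys : List Int) (capacity : Int) : Option Int :=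
  pvFirstEmptyAux keys 0 capacity.toNat

-- non_stackable loop 'for _ in range(count)': rescan for an empty slot each iteration,
-- occupying it (keys grows); 'else: return count - placed'; 'return 0' when count runs out
def pvPlaceLoop (keys : List Int) (capacity : Int) (placed : Int) (remaining : Nat) (count : Int) : Int :=
  match remaining with
  | 0 => 0
  | Nat.succ n =>
    match pvFirstEmpty keys capacity with
    | some i => pvPlaceLoop (keys ++ [i]) capacity (placed + 1) n count
    | none => count - placed

def add_to_slots (slots : List (Int × String × Int)) (enchants : List (Int × List (String × Int))) (rarities : List (Int × String)) (capacity : Int) (item_id : String) (enchant : Option (List (String × Int))) (rarity : String) (count : Int) (non_stackable : Bool) : Int :=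
  let norm_rar := pvNormRarity rarity
  let keys := slots.map (·.1)
  if non_stackable then
    pvPlaceLoop keys capacity 0 count.toNat count
  else
    -- stackable: scan slots.items() with A's continue-chain; matching stack → return 0
    match slots.find? (pvChain enchants rarities item_id enchant norm_rar) with
    | some _ => 0
    | none =>
      -- no matching stack: first empty slot → return 0, else count
      match pvFirstEmpty keys capacity with
      | some _ => 0
      | none => count

-- ===== PORT B =====
-- Source B's combined match condition: iid == item_id and enchants.get(slot) == enchant and rarities.get(slot,'common') == norm
def pvMatches (enchants : List (Int × List (String × Int))) (rarities : List (Int × String)) (item_id : String) (enchant : Option (List (String × Int))) (norm : String) (p : Int × String × Int) : Bool :=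
  p.2.1 == item_id && pvOptDictEq (pvGetEnch enchants p.1) enchant
    && pvGetRar rarities p.1 == norm

-- Source B computes the occupied in-range key set and the empty-slot count empt = max(capacity,0) - len(occ)
-- once, and returns closed formulas: max(count - empt, 0) for non-stackables, and empt == 0 deciding
-- overflow for a new stack.  Source B's empty_slots() gap-walk and place() only MUTATE the three dicts;
-- they never influence the returned overflow, so the port carries only the return-relevant code.
def add_to_slots_alt (slots : List (Int × String × Int)) (enchants : List (Int × List (String × Int))) (rarities : List (Int × String)) (capacity : Int) (item_id : String) (enchant : Option (List (String × Int))) (rarity : String) (count : Int) (non_stackable : Bool) : Int :=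
  let norm_rar := if rarity = "" then "common" else rarity   -- rarity or 'common'
  let occ : PySem.Set Int := PySem.Set.ofList
      ((slots.map (·.1)).filter (fun k => decide (0 ≤ k) && decide (k < capacity)))
  let empt := max capacity 0 - (occ.length : Int)
  if non_stackable then
    max (count - empt) 0
  else if slots.any (pvMatches enchants rarities item_id enchant norm_rar) then 0
  else if empt = 0 then count else 0

-- ===== PRECONDITION & SPEC =====
def Spec_add_to_slots (slots : List (Int × String × Int)) (enchants : List (Int × List (String × Int))) (rarities : List (Int × String)) (capacity : Int) (item_id : String) (enchant : Option (List (String × Int))) (rarity : String) (count : Int) (non_stackable : Bool) (out : Int) : Prop := out = add_to_slots_alt slots enchants rarities capacity item_id enchant rarity count non_stackable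
instance (slots : List (Int × String × Int)) (enchants : List (Int × List (String × Int))) (rarities : List (Int × String)) (capacity : Int) (item_id : String) (enchant : Option (List (String × Int))) (rarity : String) (count : Int) (non_stackable : Bool) (out : Int) : Decidable (Spec_add_to_slots slots enchants rarities capacity item_id enchant rarity count non_stackable out) := by unfold Spec_add_to_slots; infer_instance

-- ===== CLAIM (what is proved, stated in full; the proofs are below) =====
def Claim_equal_add_to_slots : Prop := ∀ (slots : List (Int × String × Int)) (enchants : List (Int × List (String × Int))) (rarities : List (Int × String)) (capacity : Int) (item_id : String) (enchant : Option (List (String × Int))) (rarity : String) (count : Int) (non_stackable : Bool), Dom_add_to_slots slots enchants rarities capacity item_id enchant rarity count non_stackable → Spec_add_to_slots slots enchants rarities capacity item_id enchant rarity count non_stackable (add_to_slots slots enchants rarities capacity item_id enchant rarity count non_stackable)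

-- ===== LEMMAS AND PROOFS =====

-- proof-only: the index sequence a counting loop visits
def pvIdx (start : Int) : Nat → List Int
  | 0 => []
  | Nat.succ n => start :: pvIdx (start + 1) n

lemma pvIdx_ge : ∀ (fuel : Nat) (start x : Int), x ∈ pvIdx start fuel → start ≤ x := by
  intro fuel
  induction fuel with
  | zero => intro start x h; simp [pvIdx] at h
  | succ n ih =>
    intro start x h
    rcases (List.mem_cons.1 h) with h | h
    · omega
    · have := ih (start + 1) x h; omega

lemma pvIdx_nodup : ∀ (fuel : Nat) (start : Int), (pvIdx start fuel).Nodup := by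
  intro fuel
  induction fuel with
  | zero => intro start; simp [pvIdx]
  | succ n ih =>
    intro start
    refine List.nodup_cons.2 ⟨fun h => ?_, ih (start + 1)⟩
    have := pvIdx_ge n (start + 1) start h; omega

-- the counting loop visits exactly list(range(start, start+n))
lemma pvIdx_eq_pyRange : ∀ (n : Nat) (start : Int),
    pvIdx start n = PySem.List.pyRange start (start + n) 1 := by
  intro n
  induction n with
  | zero =>
    intro start
    rw [PySem.List.pyRange_one_eq_nil (by omega)]
    rfl
  | succ m ih =>
    intro start
    rw [pvIdx, PySem.List.pyRange_one_cons (by omega), ih (start + 1)]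
    norm_num
    ring_nf

lemma pvFirstEmptyAux_eq (keys : List Int) :
    ∀ (fuel : Nat) (i : Int),
      pvFirstEmptyAux keys i fuel = (pvIdx i fuel).find? (fun x => !(keys.contains x)) := by
  intro fuel
  induction fuel with
  | zero => intro i; rfl
  | succ n ih =>
    intro i
    rw [pvFirstEmptyAux, pvIdx, List.find?_cons]
    by_cases h : i ∈ keys <;> simp [h, ih]

-- the empty-slot indices over a given occupied-key list
def pvEmpt (keys : List Int) (capacity : Int) : List Int :=
  (pvIdx 0 capacity.toNat).filter (fun i => !(keys.contains i))

lemma pvFirstEmpty_eq_head (keys : List Int) (capacity : Int) :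
    pvFirstEmpty keys capacity = (pvEmpt keys capacity).head? := by
  rw [pvFirstEmpty, pvFirstEmptyAux_eq, pvEmpt, List.head?_filter]

lemma pvEmpt_nodup (keys : List Int) (capacity : Int) : (pvEmpt keys capacity).Nodup :=
  (pvIdx_nodup capacity.toNat 0).filter _

lemma pvEmpt_append (keys : List Int) (capacity : Int) (i : Int) :
    pvEmpt (keys ++ [i]) capacity = (pvEmpt keys capacity).filter (fun x => !(x == i)) := by
  simp only [pvEmpt, List.filter_filter]
  congr 1
  funext x
  simp only [List.contains_append, Bool.not_or]
  cases h : decide (x = i) <;> simp_all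

lemma pvEmpt_step (keys : List Int) (capacity : Int) (i : Int) (tl : List Int)
    (h : pvEmpt keys capacity = i :: tl) :
    pvEmpt (keys ++ [i]) capacity = tl := by
  have hnd : (i :: tl).Nodup := h ▸ pvEmpt_nodup keys capacity
  have hi : i ∉ tl := (List.nodup_cons.1 hnd).1
  rw [pvEmpt_append, h, List.filter_cons_of_neg (by simp)]
  refine List.filter_eq_self.2 (fun x hx => ?_)
  have hxi : x ≠ i := fun hxi => hi (hxi ▸ hx)
  simp [hxi]

lemma pvPlaceLoop_eq (capacity : Int) : ∀ (n : Nat) (keys : List Int) (placed count : Int),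
    pvPlaceLoop keys capacity placed n count =
      if n ≤ (pvEmpt keys capacity).length then 0
      else count - placed - (pvEmpt keys capacity).length := by
  intro n
  induction n with
  | zero => intro keys placed count; simp [pvPlaceLoop]
  | succ n ih =>
    intro keys placed count
    rw [pvPlaceLoop, pvFirstEmpty_eq_head]
    cases he : pvEmpt keys capacity with
    | nil => simp
    | cons i tl =>
      simp only [List.head?_cons, ih, pvEmpt_step keys capacity i tl he,
        List.length_cons]
      split_ifs <;> omega

lemma pvIdx_length : ∀ (n : Nat) (start : Int), (pvIdx start n).length = n := by
  intro n
  induction n with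
  | zero => intro start; rfl
  | succ m ih => intro start; simp [pvIdx, ih]

lemma mem_pvIdx (capacity x : Int) : x ∈ pvIdx 0 capacity.toNat ↔ 0 ≤ x ∧ x < capacity := by
  rw [pvIdx_eq_pyRange, PySem.List.mem_pyRange_one]
  omega

-- the number of empty in-range slots is max(capacity,0) minus the number of distinct occupied in-range keys
lemma pvEmpt_length (keys : List Int) (capacity : Int) :
    ((pvEmpt keys capacity).length : Int)
      = max capacity 0 - ((PySem.Set.ofList
          (keys.filter (fun k => decide (0 ≤ k) && decide (k < capacity)))).length : Int) := by
  have hsplit := List.length_eq_length_filter_add (l := pvIdx 0 capacity.toNat)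
      (fun i => !(keys.contains i))
  have hperm : List.Perm ((pvIdx 0 capacity.toNat).filter (fun i => !(!(keys.contains i))))
      (PySem.Set.ofList (keys.filter (fun k => decide (0 ≤ k) && decide (k < capacity)))) := by
    rw [List.perm_ext_iff_of_nodup ((pvIdx_nodup _ _).filter _) (PySem.Set.nodup_ofList _)]
    intro x
    rw [List.mem_filter, PySem.Set.mem_ofList, List.mem_filter, mem_pvIdx]
    simp only [Bool.not_not, List.contains_eq_mem, decide_eq_true_iff, Bool.and_eq_true]
    tauto
  have hlen := hperm.length_eq
  have hidx := pvIdx_length capacity.toNat 0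
  have : (pvEmpt keys capacity).length
      = ((pvIdx 0 capacity.toNat).filter (fun i => !(keys.contains i))).length := rfl
  omega

-- A's continue-chain predicate equals B's combined condition
lemma pvChain_eq (enchants : List (Int × List (String × Int))) (rarities : List (Int × String))
    (item_id : String) (enchant : Option (List (String × Int))) (norm : String) :
    pvChain enchants rarities item_id enchant norm = pvMatches enchants rarities item_id enchant norm := by
  funext p
  unfold pvChain pvMatches
  by_cases h1 : p.2.1 = item_id <;>
    by_cases h2 : pvOptDictEq (pvGetEnch enchants p.1) enchant = true <;>
      by_cases h3 : pvGetRar rarities p.1 = norm <;>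
        simp [h1, h2, h3]

-- ===== VERDICT (by name: the statement is the Claim_ definition above) =====
theorem add_to_slots_spec : Claim_equal_add_to_slots := by
  intro slots enchants rarities capacity item_id enchant rarity count non_stackable _
  unfold Spec_add_to_slots add_to_slots add_to_slots_alt
  have hlen := pvEmpt_length (slots.map (·.1)) capacity
  cases non_stackable with
  | true =>
    simp only [if_true]
    rw [pvPlaceLoop_eq, ← hlen]
    split_ifs <;> omega
  | false =>
    simp only [Bool.false_eq_true, if_false, pvNormRarity, pvChain_eq]
    rw [← hlen]
    cases hf : slots.find?
        (pvMatches enchants rarities item_id enchant (if rarity = "" then "common" else rarity)) with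
    | some q =>
      have hany : slots.any
          (pvMatches enchants rarities item_id enchant (if rarity = "" then "common" else rarity)) = true :=
        List.any_eq_true.2 ⟨q, List.mem_of_find?_eq_some hf, List.find?_some hf⟩
      rw [hany]
      rfl
    | none =>
      have hany : slots.any
          (pvMatches enchants rarities item_id enchant (if rarity = "" then "common" else rarity)) = false := by
        rw [List.any_eq_false]
        intro p hp
        simpa using List.find?_eq_none.1 hf p hp
      rw [hany, pvFirstEmpty_eq_head]
      cases pvEmpt (slots.map (·.1)) capacity with
      | nil => simp
      | cons i tl => simp; omega
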